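-- pv_equiv track=rewrite | github.com/LeoYANQING/COMP7404- | a2/p4.py | generate_layout_string
-- ===== SOURCE A (Python) =====
-- def generate_layout_string(pacman_pos, ghosts_pos, foods, original_layout):
--     layout = []
--     for i in range(len(original_layout)):
--         row = []
--         for j in range(len(original_layout[i])):
--             if pacman_pos is not None and (i, j) == pacman_pos:
--                 row.append('P')
--             elif (i, j) in ghosts_pos.values():
--                 for ghost in sorted(ghosts_pos.keys()):
--                     if ghosts_pos[ghost] == (i, j):
--                         row.append(ghost)
--                         break
--             elif original_layout[i][j] == '%':
--                 row.append('%')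
--             elif (i, j) in foods:
--                 row.append('.')
--             else:
--                 row.append(' ')
--         layout.append(''.join(row))
--     return '\n'.join(layout)
-- ===== SOURCE B (Python) =====
-- def generate_layout_string(pacman_pos, ghosts_pos, foods, original_layout):
--     overrides = {}
--     for g in sorted(ghosts_pos, reverse=True):
--         overrides[ghosts_pos[g]] = g
--     if pacman_pos is not None:
--         overrides[pacman_pos] = 'P'
--     rows = []
--     for i, line in enumerate(original_layout):
--         row = []
--         for j, c in enumerate(line):
--             ch = overrides.get((i, j))
--             if ch is None:
--                 ch = '%' if c == '%' else ('.' if (i, j) in foods else ' ')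
--             row.append(ch)
--         rows.append(''.join(row))
--     return '\n'.join(rows)
-- ===== Notes on version B (the rewrite author's own statement) =====
-- stated objective: faster
-- what changed: A re-scans and re-sorts the ghost dictionary at every grid cell (membership in values() plus sorted(keys()) per hit); B builds one override dict (ghosts painted in reverse-sorted key order, then pacman) so each cell is a single O(1) lookup, iterating with enumerate instead of index ranges.
import Mathlib
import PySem

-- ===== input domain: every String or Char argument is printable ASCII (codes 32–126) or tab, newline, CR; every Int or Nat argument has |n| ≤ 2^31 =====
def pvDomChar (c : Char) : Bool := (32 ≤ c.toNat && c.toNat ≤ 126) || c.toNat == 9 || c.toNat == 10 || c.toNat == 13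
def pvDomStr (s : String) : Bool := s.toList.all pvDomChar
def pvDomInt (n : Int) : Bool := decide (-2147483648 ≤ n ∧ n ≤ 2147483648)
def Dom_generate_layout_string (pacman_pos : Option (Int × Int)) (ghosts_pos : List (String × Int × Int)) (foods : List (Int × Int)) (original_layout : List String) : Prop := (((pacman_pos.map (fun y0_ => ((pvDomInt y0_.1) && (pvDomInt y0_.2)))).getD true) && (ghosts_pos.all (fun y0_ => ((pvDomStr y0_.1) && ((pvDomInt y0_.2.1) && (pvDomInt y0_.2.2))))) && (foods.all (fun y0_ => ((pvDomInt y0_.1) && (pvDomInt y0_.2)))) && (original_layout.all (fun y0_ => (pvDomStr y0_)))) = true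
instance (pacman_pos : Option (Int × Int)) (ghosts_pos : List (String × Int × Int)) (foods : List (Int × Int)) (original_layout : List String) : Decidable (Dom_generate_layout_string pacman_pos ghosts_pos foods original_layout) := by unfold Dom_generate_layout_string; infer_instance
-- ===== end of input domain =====

-- B replaces A's per-cell ghost scan (membership in values + a fresh sort of the keys at every
-- hit) by one override dictionary built once (ghosts painted in reverse-sorted key order, pacman
-- last), so each cell is a single dictionary lookup; return value only, no mutation involved.

-- ===== PORT A =====
def generate_layout_string (pacman_pos : Option (Int × Int)) (ghosts_pos : List (String × Int × Int)) (foods : List (Int × Int)) (original_layout : List String) : String :=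
  let d := PySem.Dict.mk ghosts_pos
  PySem.Str.join "\n" ((List.range original_layout.length).map (fun i =>
    let line := (original_layout.getD i "").toList
    PySem.Str.join "" ((List.range line.length).map (fun j =>
      if pacman_pos == some (Int.ofNat i, Int.ofNat j) then "P"
      else if (Int.ofNat i, Int.ofNat j) ∈ d.values then
        match (PySem.List.sorted d.keys (fun x => x) false).find?
            (fun g => d.getD g (0, 0) == (Int.ofNat i, Int.ofNat j)) with
        | some g => g
        | none => ""
      else if line.getD j ' ' == '%' then "%"
      else if (Int.ofNat i, Int.ofNat j) ∈ foods then "."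
      else " "))))

-- ===== PORT B =====
def generate_layout_string_alt (pacman_pos : Option (Int × Int)) (ghosts_pos : List (String × Int × Int)) (foods : List (Int × Int)) (original_layout : List String) : String :=
  let d := PySem.Dict.mk ghosts_pos
  let ov0 : PySem.Dict (Int × Int) String :=
    (PySem.List.sorted d.keys (fun x => x) true).foldl
      (fun ov g => ov.insert (d.getD g (0, 0)) g) PySem.Dict.empty
  let ov := match pacman_pos with
    | some p => ov0.insert p "P"
    | none => ov0
  PySem.Str.join "\n" ((PySem.List.enumerate original_layout 0).map (fun iv =>
    PySem.Str.join "" ((PySem.List.enumerate iv.2.toList 0).map (fun jc =>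
      match ov.get? (iv.1, jc.1) with
      | some ch => ch
      | none =>
        if jc.2 == '%' then "%"
        else if (iv.1, jc.1) ∈ foods then "."
        else " "))))

-- ===== PRECONDITION & SPEC =====
-- ghosts_pos encodes a Python dict, whose keys are necessarily distinct; Pre_ states exactly
-- that (it excludes no Python input A accepts).
def Pre_generate_layout_string (pacman_pos : Option (Int × Int)) (ghosts_pos : List (String × Int × Int)) (foods : List (Int × Int)) (original_layout : List String) : Prop := (ghosts_pos.map (·.1)).Nodup
instance (pacman_pos : Option (Int × Int)) (ghosts_pos : List (String × Int × Int)) (foods : List (Int × Int)) (original_layout : List String) : Decidable (Pre_generate_layout_string pacman_pos ghosts_pos foods original_layout) := by unfold Pre_generate_layout_string; infer_instance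

def pvWitness_generate_layout_string : (Option (Int × Int)) × (List (String × Int × Int)) × (List (Int × Int)) × List String := (some (0, 0), [("g", 0, 1)], [(0, 2)], ["%.  "])

def Spec_generate_layout_string (pacman_pos : Option (Int × Int)) (ghosts_pos : List (String × Int × Int)) (foods : List (Int × Int)) (original_layout : List String) (out : String) : Prop := out = generate_layout_string_alt pacman_pos ghosts_pos foods original_layout
instance (pacman_pos : Option (Int × Int)) (ghosts_pos : List (String × Int × Int)) (foods : List (Int × Int)) (original_layout : List String) (out : String) : Decidable (Spec_generate_layout_string pacman_pos ghosts_pos foods original_layout out) := by unfold Spec_generate_layout_string; infer_instance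

-- ===== CLAIM (what is proved, stated in full; the proofs are below) =====
def Claim_equal_generate_layout_string : Prop := ∀ (pacman_pos : Option (Int × Int)) (ghosts_pos : List (String × Int × Int)) (foods : List (Int × Int)) (original_layout : List String), Dom_generate_layout_string pacman_pos ghosts_pos foods original_layout → Pre_generate_layout_string pacman_pos ghosts_pos foods original_layout → Spec_generate_layout_string pacman_pos ghosts_pos foods original_layout (generate_layout_string pacman_pos ghosts_pos foods original_layout)

-- ===== LEMMAS AND PROOFS =====

-- mapping a function over enumerate = mapping over the index range (any in-range default)
lemma pv_map_enumerate {α β : Type} (dflt : α) (f : Int × α → β) :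
    ∀ (xs : List α) (s : Int),
      (PySem.List.enumerate xs s).map f
        = (List.range xs.length).map (fun i => f (s + Int.ofNat i, xs.getD i dflt)) := by
  intro xs
  induction xs with
  | nil => intro s; simp [PySem.List.enumerate_nil]
  | cons x t ih =>
    intro s
    rw [PySem.List.enumerate_cons]
    simp only [List.map_cons, List.length_cons, List.range_succ_eq_map, List.map_map]
    rw [ih (s + 1)]
    congr 1
    · simp
    · apply List.map_congr_left
      intro i _
      simp only [Function.comp_apply, List.getD_cons_succ]
      congr 1
      simp [Prod.ext_iff]
      omega

-- lookup in a dict built by an insert loop = last matching insertion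
lemma pv_get?_foldl_insert {κ α : Type} [BEq κ] [LawfulBEq κ] [DecidableEq κ] (f : α → κ) :
    ∀ (l : List α) (d0 : PySem.Dict κ α) (p : κ),
      ((l.foldl (fun dd g => dd.insert (f g) g) d0).get? p)
        = (match l.reverse.find? (fun g => f g == p) with
           | some g => some g
           | none => d0.get? p) := by
  intro l
  induction l with
  | nil => intro d0 p; simp
  | cons a t ih =>
    intro d0 p
    rw [List.foldl_cons, ih, List.reverse_cons, List.find?_append]
    cases h : t.reverse.find? (fun g => f g == p) with
    | some g => simp
    | none =>
      simp only [List.find?_cons, List.find?_nil]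
      rw [PySem.Dict.get?_insert]
      by_cases hp : p = f a
      · simp [hp]
      · have hfa : (f a == p) = false := beq_eq_false_iff_ne.mpr (fun e => hp e.symm)
        simp [hfa]
        exact fun e => absurd e hp

-- on a duplicate-free list, reverse-sorting then reversing is sorting
lemma pv_rev_sorted_eq (l : List String) (h : l.Nodup) :
    (PySem.List.sorted l (fun x => x) true).reverse = PySem.List.sorted l (fun x => x) false := by
  have hperm : ((PySem.List.sorted l (fun x => x) true).reverse).Perm l :=
    (List.reverse_perm _).trans (PySem.List.sorted_perm l _ true)
  have hle : (PySem.List.sorted l (fun x => x) true).reverse.Pairwise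
      (fun a b : String => a ≤ b) := by
    rw [List.pairwise_reverse]
    exact PySem.List.sorted_pairwise_rev l _
  have hnd : (PySem.List.sorted l (fun x => x) true).reverse.Nodup :=
    hperm.nodup_iff.mpr h
  exact (PySem.List.sorted_eq_of_perm_of_pairwise_lt l _ (fun x => x) hperm
    ((hle.and hnd).imp (fun hab => lt_of_le_of_ne hab.1 hab.2))).symm

-- a value is in the dict iff the sorted-key scan finds a key mapped to it
lemma pv_mem_values_iff_find (d : PySem.Dict String (Int × Int)) (hnd : d.keys.Nodup) (p : Int × Int) :
    p ∈ d.values ↔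
      ((PySem.List.sorted d.keys (fun x => x) false).find? (fun g => d.getD g (0, 0) == p)).isSome := by
  rw [List.find?_isSome]
  constructor
  · intro hv
    obtain ⟨q, hq, hq2⟩ := List.mem_map.mp hv
    refine ⟨q.1, ?_, ?_⟩
    · rw [PySem.List.mem_sorted]
      exact List.mem_map.mpr ⟨q, hq, rfl⟩
    · rw [PySem.Dict.getD_of_mem_items d (k := q.1) (v := q.2) (by simpa using hq) hnd]
      simp [hq2]
  · rintro ⟨g, hg, hpred⟩
    rw [PySem.List.mem_sorted] at hg
    obtain ⟨q, hq, hq1⟩ := List.mem_map.mp hg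
    have h2 := PySem.Dict.getD_of_mem_items d (k := q.1) (v := q.2) (by simpa using hq) hnd ((0:Int),(0:Int))
    rw [hq1] at h2
    rw [h2] at hpred
    have h3 : q.2 = p := by simpa using hpred
    exact List.mem_map.mpr ⟨q, hq, h3⟩

-- one cell of the grid: A's branch chain = B's override-dict lookup
lemma pv_cell (pac : Option (Int × Int)) (gh : List (String × Int × Int)) (foods : List (Int × Int))
    (hnd : (PySem.Dict.mk gh).keys.Nodup) (p : Int × Int) (c : Char) :
    (if pac == some p then "P"
     else if p ∈ (PySem.Dict.mk gh).values then
       (match (PySem.List.sorted (PySem.Dict.mk gh).keys (fun x => x) false).find?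
           (fun g => (PySem.Dict.mk gh).getD g (0, 0) == p) with
        | some g => g
        | none => "")
     else if c == '%' then "%" else if p ∈ foods then "." else " ")
    =
    (match (match pac with
            | some q => (((PySem.List.sorted (PySem.Dict.mk gh).keys (fun x => x) true).foldl
                (fun (ov : PySem.Dict (Int × Int) String) g => ov.insert ((PySem.Dict.mk gh).getD g (0, 0)) g) PySem.Dict.empty).insert q "P")
            | none => ((PySem.List.sorted (PySem.Dict.mk gh).keys (fun x => x) true).foldl
                (fun (ov : PySem.Dict (Int × Int) String) g => ov.insert ((PySem.Dict.mk gh).getD g (0, 0)) g) PySem.Dict.empty)).get? p with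
     | some ch => ch
     | none => if c == '%' then "%" else if p ∈ foods then "." else " ") := by
  have hfold : ((PySem.List.sorted (PySem.Dict.mk gh).keys (fun x => x) true).foldl
      (fun (ov : PySem.Dict (Int × Int) String) g => ov.insert ((PySem.Dict.mk gh).getD g (0, 0)) g) PySem.Dict.empty).get? p
      = (match (PySem.List.sorted (PySem.Dict.mk gh).keys (fun x => x) false).find?
            (fun g => (PySem.Dict.mk gh).getD g (0, 0) == p) with
         | some g => some g
         | none => none) := by
    rw [pv_get?_foldl_insert (fun g => (PySem.Dict.mk gh).getD g (0, 0))]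
    rw [pv_rev_sorted_eq _ hnd]
    cases (PySem.List.sorted (PySem.Dict.mk gh).keys (fun x => x) false).find?
        (fun g => (PySem.Dict.mk gh).getD g (0, 0) == p) with
    | some g => rfl
    | none => simp
  have hbase : (pac == some p) = false →
      (if pac == some p then "P"
       else if p ∈ (PySem.Dict.mk gh).values then
         (match (PySem.List.sorted (PySem.Dict.mk gh).keys (fun x => x) false).find?
             (fun g => (PySem.Dict.mk gh).getD g (0, 0) == p) with
          | some g => g
          | none => "")
       else if c == '%' then "%" else if p ∈ foods then "." else " ")
      = (match (match (PySem.List.sorted (PySem.Dict.mk gh).keys (fun x => x) false).find?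
            (fun g => (PySem.Dict.mk gh).getD g (0, 0) == p) with
         | some g => some g
         | none => none) with
         | some ch => ch
         | none => if c == '%' then "%" else if p ∈ foods then "." else " ") := by
    intro hp
    rw [if_neg (by simp [hp])]
    cases hfind : (PySem.List.sorted (PySem.Dict.mk gh).keys (fun x => x) false).find?
        (fun g => (PySem.Dict.mk gh).getD g (0, 0) == p) with
    | some g =>
      have hv : p ∈ (PySem.Dict.mk gh).values :=
        (pv_mem_values_iff_find _ hnd p).mpr (by rw [hfind]; rfl)
      rw [if_pos hv]
    | none =>
      have hv : p ∉ (PySem.Dict.mk gh).values := by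
        intro hmem
        have := (pv_mem_values_iff_find _ hnd p).mp hmem
        rw [hfind] at this
        exact absurd this (by simp)
      rw [if_neg hv]
  cases pac with
  | none =>
    rw [hfold]
    exact hbase rfl
  | some q =>
    by_cases hpq : q = p
    · subst hpq
      rw [PySem.Dict.get?_insert]
      simp
    · rw [PySem.Dict.get?_insert, if_neg (show ¬ p = q from fun e => hpq e.symm), hfold]
      exact hbase (by simp [hpq])

-- ===== VERDICT (by name: the statement is the Claim_ definition above) =====
theorem generate_layout_string_spec : Claim_equal_generate_layout_string := by
  intro pac gh foods layout _hdom hpre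
  unfold Spec_generate_layout_string
  have hnd : (PySem.Dict.mk gh).keys.Nodup := hpre
  unfold generate_layout_string generate_layout_string_alt
  simp only []
  rw [pv_map_enumerate ""]
  congr 1
  apply List.map_congr_left
  intro i _
  rw [pv_map_enumerate ' ']
  simp only [zero_add]
  congr 1
  apply List.map_congr_left
  intro j _
  exact pv_cell pac gh foods hnd (Int.ofNat i, Int.ofNat j) ((layout.getD i "").toList.getD j ' ')
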